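-- pv_equiv track=rewrite | github.com/zduguid/acd | acd.py | get_cut_polygon
-- ===== SOURCE A (Python) =====
-- def get_cut_polygon(polygon_open, notch, cut_point):
--     """
--     divides the polygon into two subpieces using diagonal connecting notch and cut point
--     :param polygon_open: the input polygon to be divided into two polygons
--     :param notch: one point on the diagonal that divides the polygon into two pieces
--     :param cut_point: one point on the diagonal that divides the polygon into two pieces
--     :returns: list of two polygons that represent the input polygon after being cut by the diagonal
--     """
--     # get the indices of points that constitute the diagonal
--     for i in range(len(polygon_open)):
--         if polygon_open[i] == cut_point:    index1 = i
--         elif polygon_open[i] == notch:      index2 = i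
--
--     # initialize the two polygons that arise from making the cut
--     polygon1 = []
--     polygon2 = []
--
--     # derive the two resulting polygons
--     for i in range(len(polygon_open)):
--         if i < min(index1,index2):
--             polygon1.append(polygon_open[i])
--
--         elif i == min(index1,index2):
--             polygon1.append(polygon_open[i])
--             polygon2.append(polygon_open[i])
--
--         elif i > min(index1,index2) and i < max(index1,index2):
--             polygon2.append(polygon_open[i])
--
--         elif i == max(index1,index2):
--             polygon1.append(polygon_open[i])
--             polygon2.append(polygon_open[i])
--
--         elif i > max(index1,index2):
--             polygon1.append(polygon_open[i])
--
--     return polygon1,polygon2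
-- ===== SOURCE B (Python) =====
-- def get_cut_polygon(polygon_open, notch, cut_point):
--     # One backwards sweep with a three-phase state machine: walking from the end,
--     # the first diagonal point met is automatically the later cut vertex (last
--     # occurrence) and the next match of the remaining point is the earlier one,
--     # so no indices, min/max or slicing are ever computed.
--     state = 0            # 0: past the later cut vertex, 1: between them, 2: before the earlier one
--     other = None         # the diagonal point still to be found once the first is seen
--     tail, mid, head = [], [], []
--     for p in reversed(polygon_open):
--         if state == 0:
--             if p == cut_point or p == notch:
--                 other = notch if p == cut_point else cut_point
--                 state = 1
--                 tail.append(p)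
--                 mid.append(p)
--             else:
--                 tail.append(p)
--         elif state == 1:
--             if p == other:
--                 state = 2
--                 mid.append(p)
--                 head.append(p)
--             else:
--                 mid.append(p)
--         else:
--             head.append(p)
--     if polygon_open and state != 2:
--         raise ValueError("notch and cut_point must both occur in polygon_open")
--     head.reverse(); tail.reverse(); mid.reverse()
--     return head + tail, mid
-- ===== Notes on version B (the rewrite author's own statement) =====
-- stated objective: alternative
-- what changed: B replaces A's two staged index passes (find both diagonal indices, then classify each index against min/max in five branches) by a single backwards sweep with a three-phase state machine that never computes indices: walking from the end, the first diagonal point met is the later cut vertex and the next match of the remaining point the earlier one, the three output segments being accumulated as the states change.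
import Mathlib
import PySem

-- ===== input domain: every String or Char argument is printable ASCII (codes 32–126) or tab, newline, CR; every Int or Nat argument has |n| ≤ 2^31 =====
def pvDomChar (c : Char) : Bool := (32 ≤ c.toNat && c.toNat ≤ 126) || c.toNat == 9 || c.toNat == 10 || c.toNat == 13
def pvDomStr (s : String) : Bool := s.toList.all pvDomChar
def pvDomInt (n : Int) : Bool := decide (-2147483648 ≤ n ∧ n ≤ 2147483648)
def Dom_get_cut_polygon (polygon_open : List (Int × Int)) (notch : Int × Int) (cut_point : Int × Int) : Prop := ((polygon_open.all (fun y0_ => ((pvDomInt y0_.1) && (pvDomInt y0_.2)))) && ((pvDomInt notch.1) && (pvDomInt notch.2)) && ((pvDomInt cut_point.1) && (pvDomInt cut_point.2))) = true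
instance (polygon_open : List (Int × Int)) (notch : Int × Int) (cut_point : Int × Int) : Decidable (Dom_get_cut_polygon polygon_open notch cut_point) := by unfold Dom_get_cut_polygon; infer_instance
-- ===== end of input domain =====

-- B replaces A's two index passes by a single backwards sweep with a three-phase state
-- machine that accumulates the three output segments directly (objective: alternative).


-- ===== PORT A =====
-- polygon_open[i] is read with i always in range, so pyGetD with a dummy default is exact there.
-- A's first loop: the last assignments to index1 / index2 (none = name never bound)
def pvFind (polygon_open : List (Int × Int)) (notch : Int × Int) (cut_point : Int × Int) : Option Int × Option Int :=
  (PySem.List.pyRange 0 (polygon_open.length : Int) 1).foldl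
    (fun (st : Option Int × Option Int) i =>
      if PySem.List.pyGetD polygon_open i (0, 0) = cut_point then (some i, st.2)
      else if PySem.List.pyGetD polygon_open i (0, 0) = notch then (st.1, some i)
      else st)
    (none, none)

-- A's second loop: the five-branch classification building (polygon1, polygon2)
def pvSplit (polygon_open : List (Int × Int)) (index1 index2 : Int) : (List (Int × Int)) × (List (Int × Int)) :=
  (PySem.List.pyRange 0 (polygon_open.length : Int) 1).foldl
    (fun (ps : List (Int × Int) × List (Int × Int)) i =>
      if i < min index1 index2 then (ps.1 ++ [PySem.List.pyGetD polygon_open i (0, 0)], ps.2)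
      else if i = min index1 index2 then (ps.1 ++ [PySem.List.pyGetD polygon_open i (0, 0)], ps.2 ++ [PySem.List.pyGetD polygon_open i (0, 0)])
      else if min index1 index2 < i ∧ i < max index1 index2 then (ps.1, ps.2 ++ [PySem.List.pyGetD polygon_open i (0, 0)])
      else if i = max index1 index2 then (ps.1 ++ [PySem.List.pyGetD polygon_open i (0, 0)], ps.2 ++ [PySem.List.pyGetD polygon_open i (0, 0)])
      else if max index1 index2 < i then (ps.1 ++ [PySem.List.pyGetD polygon_open i (0, 0)], ps.2)
      else ps)
    ([], [])

def get_cut_polygon (polygon_open : List (Int × Int)) (notch : Int × Int) (cut_point : Int × Int) : (List (Int × Int)) × (List (Int × Int)) :=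
  match pvFind polygon_open notch cut_point with
  | (some index1, some index2) => pvSplit polygon_open index1 index2
  | _ => ([], [])   -- index1/index2 unbound: Python raises NameError; outside Pre_

-- ===== PORT B =====
-- Source B's loop body: state ∈ {0,1,2}, other : Option, and the three segment accumulators
-- packed as (state, other, tail, mid, head)
def pvStepB (notch cut_point : Int × Int)
    (st : Int × Option (Int × Int) × List (Int × Int) × List (Int × Int) × List (Int × Int))
    (p : Int × Int) : Int × Option (Int × Int) × List (Int × Int) × List (Int × Int) × List (Int × Int) :=
  if st.1 = 0 then
    if p = cut_point ∨ p = notch then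
      (1, some (if p = cut_point then notch else cut_point), st.2.2.1 ++ [p], st.2.2.2.1 ++ [p], st.2.2.2.2)
    else (0, st.2.1, st.2.2.1 ++ [p], st.2.2.2.1, st.2.2.2.2)
  else if st.1 = 1 then
    if some p = st.2.1 then (2, st.2.1, st.2.2.1, st.2.2.2.1 ++ [p], st.2.2.2.2 ++ [p])
    else (1, st.2.1, st.2.2.1, st.2.2.2.1 ++ [p], st.2.2.2.2)
  else (st.1, st.2.1, st.2.2.1, st.2.2.2.1, st.2.2.2.2 ++ [p])

-- Source B: fold the step over reversed(polygon_open), then reverse the segments and assemble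
def get_cut_polygon_alt (polygon_open : List (Int × Int)) (notch : Int × Int) (cut_point : Int × Int) : (List (Int × Int)) × (List (Int × Int)) :=
  let r := polygon_open.reverse.foldl (pvStepB notch cut_point) (0, none, [], [], [])
  if polygon_open ≠ [] ∧ r.1 ≠ 2 then ([], [])  -- Source B raises ValueError here; outside Pre_
  else (r.2.2.2.2.reverse ++ r.2.2.1.reverse, r.2.2.2.1.reverse)

-- ===== PRECONDITION & SPEC =====
-- Exactly the inputs on which A returns: on a NON-empty polygon A raises NameError unless
-- both diagonal points occur in it and are distinct; on the empty polygon A's loops never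
-- run and it returns ([], []).
def Pre_get_cut_polygon (polygon_open : List (Int × Int)) (notch : Int × Int) (cut_point : Int × Int) : Prop :=
  polygon_open = [] ∨ (notch ≠ cut_point ∧ cut_point ∈ polygon_open ∧ notch ∈ polygon_open)
instance (polygon_open : List (Int × Int)) (notch : Int × Int) (cut_point : Int × Int) : Decidable (Pre_get_cut_polygon polygon_open notch cut_point) := by unfold Pre_get_cut_polygon; infer_instance
def pvWitness_get_cut_polygon : (List (Int × Int)) × (Int × Int) × (Int × Int) :=
  ([(0, 0), (2, 0), (1, 1), (0, 2)], (1, 1), (0, 0))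
def Spec_get_cut_polygon (polygon_open : List (Int × Int)) (notch : Int × Int) (cut_point : Int × Int) (out : (List (Int × Int)) × (List (Int × Int))) : Prop := out = get_cut_polygon_alt polygon_open notch cut_point
instance (polygon_open : List (Int × Int)) (notch : Int × Int) (cut_point : Int × Int) (out : (List (Int × Int)) × (List (Int × Int))) : Decidable (Spec_get_cut_polygon polygon_open notch cut_point out) := by unfold Spec_get_cut_polygon; infer_instance

-- ===== CLAIM (what is proved, stated in full; the proofs are below) =====
def Claim_equal_get_cut_polygon : Prop := ∀ (polygon_open : List (Int × Int)) (notch : Int × Int) (cut_point : Int × Int), Dom_get_cut_polygon polygon_open notch cut_point → Pre_get_cut_polygon polygon_open notch cut_point → Spec_get_cut_polygon polygon_open notch cut_point (get_cut_polygon polygon_open notch cut_point)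

-- ===== LEMMAS AND PROOFS =====

-- every point of a nonempty list has a LAST occurrence
lemma pvExistsLast {α : Type} (x : α) :
    ∀ (l : List α), x ∈ l →
      ∃ k, ∃ hk : k < l.length, l[k] = x ∧ ∀ j (hj : j < l.length), k < j → l[j] ≠ x
  | [], h => absurd h (List.not_mem_nil)
  | a :: t, h => by
    by_cases ht : x ∈ t
    · obtain ⟨k, hk, he, hlast⟩ := pvExistsLast x t ht
      refine ⟨k + 1, by simpa using Nat.succ_lt_succ hk, by simpa using he, ?_⟩
      intro j hj hgt
      match j with
      | 0 => omega
      | j' + 1 =>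
        simp only [List.getElem_cons_succ]
        exact hlast j' (by simpa using Nat.lt_of_succ_lt_succ hj) (by omega)
    · have hax : a = x := by
        rcases List.mem_cons.mp h with e | e
        · exact e.symm
        · exact absurd e ht
      refine ⟨0, by simp, by simpa using hax, ?_⟩
      intro j hj hgt
      match j with
      | 0 => omega
      | j' + 1 =>
        simp only [List.getElem_cons_succ]
        intro e
        exact ht (e ▸ List.getElem_mem _)

-- A's first loop, as a step function over (index, point) pairs
def pvStep1 (notch cut_point : Int × Int) (st : Option Int × Option Int) (p : Int × (Int × Int)) : Option Int × Option Int :=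
  if p.2 = cut_point then (some p.1, st.2)
  else if p.2 = notch then (st.1, some p.1)
  else st

-- bridge: A's index loop over range(len(...)) is the pvStep1 fold over enumerate
lemma pvLoop1_enum (poly : List (Int × Int)) (notch cut_point : Int × Int) :
    pvFind poly notch cut_point
      = (PySem.List.enumerate poly 0).foldl (pvStep1 notch cut_point) (none, none) := by
  unfold pvFind
  rw [PySem.List.enumerate_eq_map_pyRange (d := ((0, 0) : Int × Int)), List.foldl_map]
  rfl

-- the two components of pvStep1, separated
def pvF1 (cut_point : Int × Int) (s : Option Int) (p : Int × (Int × Int)) : Option Int :=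
  if p.2 = cut_point then some p.1 else s
def pvF2 (notch cut_point : Int × Int) (s : Option Int) (p : Int × (Int × Int)) : Option Int :=
  if p.2 = cut_point then s else if p.2 = notch then some p.1 else s

lemma pvStep1_split (notch cut_point : Int × Int) (st : Option Int × Option Int) (p : Int × (Int × Int)) :
    pvStep1 notch cut_point st p = (pvF1 cut_point st.1 p, pvF2 notch cut_point st.2 p) := by
  unfold pvStep1 pvF1 pvF2
  split_ifs <;> rfl

lemma pvFold1_split (notch cut_point : Int × Int) (l : List (Int × (Int × Int))) (a b : Option Int) :
    l.foldl (pvStep1 notch cut_point) (a, b)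
      = (l.foldl (pvF1 cut_point) a, l.foldl (pvF2 notch cut_point) b) := by
  have : l.foldl (pvStep1 notch cut_point) (a, b)
      = l.foldl (fun (st : Option Int × Option Int) p => (pvF1 cut_point st.1 p, pvF2 notch cut_point st.2 p)) (a, b) :=
    PySem.List.foldl_congr_mem l (pvStep1 notch cut_point)
      (fun st p => (pvF1 cut_point st.1 p, pvF2 notch cut_point st.2 p)) (a, b)
      (fun acc p _ => pvStep1_split notch cut_point acc p)
  rw [this, PySem.List.foldl_prod_mk]

lemma pvF1_frozen (cut_point : Int × Int) :
    ∀ (l : List (Int × (Int × Int))) (s : Option Int),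
      (∀ q ∈ l, q.2 ≠ cut_point) → l.foldl (pvF1 cut_point) s = s
  | [], _, _ => rfl
  | p :: t, s, h => by
    rw [List.foldl_cons]
    have : pvF1 cut_point s p = s := by
      unfold pvF1
      rw [if_neg (h p (List.mem_cons_self ..))]
    rw [this]
    exact pvF1_frozen cut_point t s (fun q hq => h q (List.mem_cons_of_mem _ hq))

lemma pvF2_frozen (notch cut_point : Int × Int) :
    ∀ (l : List (Int × (Int × Int))) (s : Option Int),
      (∀ q ∈ l, q.2 ≠ notch) → l.foldl (pvF2 notch cut_point) s = s
  | [], _, _ => rfl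
  | p :: t, s, h => by
    rw [List.foldl_cons]
    have : pvF2 notch cut_point s p = s := by
      unfold pvF2
      by_cases h1 : p.2 = cut_point
      · rw [if_pos h1]
      · rw [if_neg h1, if_neg (h p (List.mem_cons_self ..))]
    rw [this]
    exact pvF2_frozen notch cut_point t s (fun q hq => h q (List.mem_cons_of_mem _ hq))

-- enumerate decomposed around a last occurrence
lemma pvEnumSplit (poly : List (Int × Int)) (k : Nat) (hk : k < poly.length) :
    PySem.List.enumerate poly 0
      = PySem.List.enumerate (poly.take k) 0
        ++ ((k : Int), poly[k]) :: PySem.List.enumerate (poly.drop (k + 1)) ((k : Int) + 1) := by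
  conv_lhs => rw [← List.take_append_drop k poly, List.drop_eq_getElem_cons hk]
  rw [PySem.List.enumerate_append, PySem.List.enumerate_cons]
  have hl : (0 : Int) + ((poly.take k).length : Int) = (k : Int) := by
    rw [List.length_take]; omega
  rw [hl]

lemma pvEnumTailNe (poly : List (Int × Int)) (k : Nat) (x : Int × Int)
    (hx : ∀ j (hj : j < poly.length), k < j → poly[j] ≠ x) :
    ∀ q ∈ PySem.List.enumerate (poly.drop (k + 1)) ((k : Int) + 1), q.2 ≠ x := by
  intro q hq
  rw [PySem.List.mem_enumerate_iff] at hq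
  obtain ⟨j, hj, rfl⟩ := hq
  rw [List.length_drop] at hj
  have := List.getElem_drop (xs := poly) (i := k + 1) (j := j) (h := by omega)
  simp only []
  rw [this]
  exact hx (k + 1 + j) (by omega) (by omega)

-- A's first loop returns the LAST indices of cut_point and notch
lemma pvFind_eq (poly : List (Int × Int)) (notch cut_point : Int × Int) (hnc : notch ≠ cut_point)
    (k1 k2 : Nat) (hk1 : k1 < poly.length) (hk2 : k2 < poly.length)
    (hv1 : poly[k1] = cut_point) (hv2 : poly[k2] = notch)
    (hl1 : ∀ j (hj : j < poly.length), k1 < j → poly[j] ≠ cut_point)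
    (hl2 : ∀ j (hj : j < poly.length), k2 < j → poly[j] ≠ notch) :
    pvFind poly notch cut_point = ((some (k1 : Int)), some (k2 : Int)) := by
  rw [pvLoop1_enum, pvFold1_split]
  refine Prod.ext ?_ ?_
  · show (PySem.List.enumerate poly 0).foldl (pvF1 cut_point) none = some (k1 : Int)
    rw [pvEnumSplit poly k1 hk1, List.foldl_append, List.foldl_cons]
    have hstep : pvF1 cut_point ((PySem.List.enumerate (poly.take k1) 0).foldl (pvF1 cut_point) none)
        ((k1 : Int), poly[k1]) = some (k1 : Int) := by
      unfold pvF1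
      rw [if_pos hv1]
    rw [hstep]
    exact pvF1_frozen cut_point _ _ (pvEnumTailNe poly k1 cut_point hl1)
  · show (PySem.List.enumerate poly 0).foldl (pvF2 notch cut_point) none = some (k2 : Int)
    rw [pvEnumSplit poly k2 hk2, List.foldl_append, List.foldl_cons]
    have hstep : pvF2 notch cut_point ((PySem.List.enumerate (poly.take k2) 0).foldl (pvF2 notch cut_point) none)
        ((k2 : Int), poly[k2]) = some (k2 : Int) := by
      unfold pvF2
      rw [if_neg (by simp only []; rw [hv2]; exact fun e => hnc e), if_pos hv2]
    rw [hstep]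
    exact pvF2_frozen notch cut_point _ _ (pvEnumTailNe poly k2 notch hl2)

-- A's second loop, as a step function over (index, point) pairs
def pvStep2 (index1 index2 : Int) (ps : List (Int × Int) × List (Int × Int)) (p : Int × (Int × Int)) : List (Int × Int) × List (Int × Int) :=
  if p.1 < min index1 index2 then (ps.1 ++ [p.2], ps.2)
  else if p.1 = min index1 index2 then (ps.1 ++ [p.2], ps.2 ++ [p.2])
  else if min index1 index2 < p.1 ∧ p.1 < max index1 index2 then (ps.1, ps.2 ++ [p.2])
  else if p.1 = max index1 index2 then (ps.1 ++ [p.2], ps.2 ++ [p.2])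
  else if max index1 index2 < p.1 then (ps.1 ++ [p.2], ps.2)
  else ps

lemma pvLoop2_enum (poly : List (Int × Int)) (i1 i2 : Int) :
    pvSplit poly i1 i2 = (PySem.List.enumerate poly 0).foldl (pvStep2 i1 i2) ([], []) := by
  unfold pvSplit
  rw [PySem.List.enumerate_eq_map_pyRange (d := ((0, 0) : Int × Int)), List.foldl_map]
  rfl

-- filters over a three-segment enumerate: the outer ("polygon1") predicate
lemma pvFilterSeg1 (t1 mid t3 : List (Int × Int)) (klo khi : Nat)
    (h1 : t1.length = klo + 1) (h2 : mid.length = khi - (klo + 1)) (hlt : klo < khi) :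
    ((PySem.List.enumerate (t1 ++ (mid ++ t3)) 0).filter
        (fun a => decide (a.1 ≤ (klo : Int) ∨ (khi : Int) ≤ a.1))).map (fun x => x.2)
      = t1 ++ t3 := by
  rw [PySem.List.enumerate_append, PySem.List.enumerate_append, List.filter_append,
    List.filter_append, List.map_append, List.map_append]
  have f1 : (PySem.List.enumerate t1 0).filter
      (fun a => decide (a.1 ≤ (klo : Int) ∨ (khi : Int) ≤ a.1)) = PySem.List.enumerate t1 0 := by
    rw [List.filter_eq_self]
    intro a ha
    rw [PySem.List.mem_enumerate_iff] at ha
    obtain ⟨k, hk, rfl⟩ := ha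
    simp only [decide_eq_true_eq]
    omega
  have f2 : (PySem.List.enumerate mid (0 + (t1.length : Int))).filter
      (fun a => decide (a.1 ≤ (klo : Int) ∨ (khi : Int) ≤ a.1)) = [] := by
    rw [List.filter_eq_nil_iff]
    intro a ha
    rw [PySem.List.mem_enumerate_iff] at ha
    obtain ⟨k, hk, rfl⟩ := ha
    simp only [decide_eq_true_eq]
    omega
  have f3 : (PySem.List.enumerate t3 (0 + (t1.length : Int) + (mid.length : Int))).filter
      (fun a => decide (a.1 ≤ (klo : Int) ∨ (khi : Int) ≤ a.1))
      = PySem.List.enumerate t3 (0 + (t1.length : Int) + (mid.length : Int)) := by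
    rw [List.filter_eq_self]
    intro a ha
    rw [PySem.List.mem_enumerate_iff] at ha
    obtain ⟨k, hk, rfl⟩ := ha
    simp only [decide_eq_true_eq]
    omega
  rw [f1, f2, f3]
  simp [PySem.List.map_snd_enumerate]

-- filters over a three-segment enumerate: the middle ("polygon2") predicate
lemma pvFilterSeg2 (t1 seg t3 : List (Int × Int)) (klo khi : Nat)
    (h1 : t1.length = klo) (h2 : seg.length = khi + 1 - klo) (hlt : klo < khi) :
    ((PySem.List.enumerate (t1 ++ (seg ++ t3)) 0).filter
        (fun a => decide ((klo : Int) ≤ a.1 ∧ a.1 ≤ (khi : Int)))).map (fun x => x.2)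
      = seg := by
  rw [PySem.List.enumerate_append, PySem.List.enumerate_append, List.filter_append,
    List.filter_append, List.map_append, List.map_append]
  have f1 : (PySem.List.enumerate t1 0).filter
      (fun a => decide ((klo : Int) ≤ a.1 ∧ a.1 ≤ (khi : Int))) = [] := by
    rw [List.filter_eq_nil_iff]
    intro a ha
    rw [PySem.List.mem_enumerate_iff] at ha
    obtain ⟨k, hk, rfl⟩ := ha
    simp only [decide_eq_true_eq]
    omega
  have f2 : (PySem.List.enumerate seg (0 + (t1.length : Int))).filter
      (fun a => decide ((klo : Int) ≤ a.1 ∧ a.1 ≤ (khi : Int))) = PySem.List.enumerate seg (0 + (t1.length : Int)) := by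
    rw [List.filter_eq_self]
    intro a ha
    rw [PySem.List.mem_enumerate_iff] at ha
    obtain ⟨k, hk, rfl⟩ := ha
    simp only [decide_eq_true_eq]
    omega
  have f3 : (PySem.List.enumerate t3 (0 + (t1.length : Int) + (seg.length : Int))).filter
      (fun a => decide ((klo : Int) ≤ a.1 ∧ a.1 ≤ (khi : Int))) = [] := by
    rw [List.filter_eq_nil_iff]
    intro a ha
    rw [PySem.List.mem_enumerate_iff] at ha
    obtain ⟨k, hk, rfl⟩ := ha
    simp only [decide_eq_true_eq]
    omega
  rw [f1, f2, f3]
  simp [PySem.List.map_snd_enumerate]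

lemma pvFilter1 (poly : List (Int × Int)) (klo khi : Nat) (hlt : klo < khi) (hlen : khi < poly.length) :
    ((PySem.List.enumerate poly 0).filter
        (fun a => decide (a.1 ≤ (klo : Int) ∨ (khi : Int) ≤ a.1))).map (fun x => x.2)
      = poly.take (klo + 1) ++ poly.drop khi := by
  have hdec : poly = poly.take (klo + 1) ++ ((poly.drop (klo + 1)).take (khi - (klo + 1)) ++ poly.drop khi) := by
    have h3 : poly.drop khi = (poly.drop (klo + 1)).drop (khi - (klo + 1)) := by
      rw [List.drop_drop]
      congr 1
      omega
    rw [h3, List.take_append_drop, List.take_append_drop]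
  conv_lhs => rw [hdec]
  rw [pvFilterSeg1 _ _ _ klo khi ?_ ?_ hlt]
  · rw [List.length_take]; omega
  · rw [List.length_take, List.length_drop]; omega

lemma pvFilter2 (poly : List (Int × Int)) (klo khi : Nat) (hlt : klo < khi) (hlen : khi < poly.length) :
    ((PySem.List.enumerate poly 0).filter
        (fun a => decide ((klo : Int) ≤ a.1 ∧ a.1 ≤ (khi : Int)))).map (fun x => x.2)
      = (poly.drop klo).take (khi + 1 - klo) := by
  have hdec : poly = poly.take klo ++ ((poly.drop klo).take (khi + 1 - klo) ++ poly.drop (khi + 1)) := by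
    have h3 : poly.drop (khi + 1) = (poly.drop klo).drop (khi + 1 - klo) := by
      rw [List.drop_drop]
      congr 1
      omega
    rw [h3, List.take_append_drop, List.take_append_drop]
  conv_lhs => rw [hdec]
  rw [pvFilterSeg2 _ _ _ klo khi ?_ ?_ hlt]
  · rw [List.length_take]; omega
  · rw [List.length_take, List.length_drop]; omega

lemma pvLoop2_eq (poly : List (Int × Int)) (i1 i2 : Int) (klo khi : Nat)
    (hlo : min i1 i2 = (klo : Int)) (hhi : max i1 i2 = (khi : Int))
    (hlt : klo < khi) (hlen : khi < poly.length) :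
    (PySem.List.enumerate poly 0).foldl (pvStep2 i1 i2) ([], [])
      = (poly.take (klo + 1) ++ poly.drop khi, (poly.drop klo).take (khi + 1 - klo)) := by
  have hcong : (PySem.List.enumerate poly 0).foldl (pvStep2 i1 i2) ([], [])
      = (PySem.List.enumerate poly 0).foldl
          (fun (ps : List (Int × Int) × List (Int × Int)) p =>
            ((fun (l : List (Int × Int)) (p : Int × (Int × Int)) =>
                if p.1 ≤ (klo : Int) ∨ (khi : Int) ≤ p.1 then l ++ [p.2] else l) ps.1 p,
             (fun (l : List (Int × Int)) (p : Int × (Int × Int)) =>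
                if (klo : Int) ≤ p.1 ∧ p.1 ≤ (khi : Int) then l ++ [p.2] else l) ps.2 p))
          ([], []) := by
    apply PySem.List.foldl_congr_mem
    intro acc p _
    unfold pvStep2
    simp only []
    rw [hlo, hhi]
    split_ifs <;> first | exact rfl | omega
  rw [hcong, PySem.List.foldl_prod_mk
    (f := fun (l : List (Int × Int)) (p : Int × (Int × Int)) =>
      if p.1 ≤ (klo : Int) ∨ (khi : Int) ≤ p.1 then l ++ [p.2] else l)
    (g := fun (l : List (Int × Int)) (p : Int × (Int × Int)) =>
      if (klo : Int) ≤ p.1 ∧ p.1 ≤ (khi : Int) then l ++ [p.2] else l)]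
  rw [PySem.List.foldl_append_ite (p := fun p : Int × (Int × Int) => p.1 ≤ (klo : Int) ∨ (khi : Int) ≤ p.1) (f := fun x => x.2)]
  rw [PySem.List.foldl_append_ite (p := fun p : Int × (Int × Int) => (klo : Int) ≤ p.1 ∧ p.1 ≤ (khi : Int)) (f := fun x => x.2)]
  rw [List.nil_append, List.nil_append, pvFilter1 poly klo khi hlt hlen, pvFilter2 poly klo khi hlt hlen]

-- B's state machine: in state 0, non-diagonal points only extend tail
lemma pvB0_skip (notch cut_point : Int × Int) :
    ∀ (l : List (Int × Int)) (o : Option (Int × Int)) (tl md hd : List (Int × Int)),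
      (∀ p ∈ l, p ≠ cut_point ∧ p ≠ notch) →
      l.foldl (pvStepB notch cut_point) (0, o, tl, md, hd) = (0, o, tl ++ l, md, hd)
  | [], _, _, _, _, _ => by simp
  | p :: t, o, tl, md, hd, h => by
    have hp := h p (List.mem_cons_self ..)
    rw [List.foldl_cons]
    have hstep : pvStepB notch cut_point (0, o, tl, md, hd) p = (0, o, tl ++ [p], md, hd) := by
      unfold pvStepB
      rw [if_pos rfl, if_neg (by rintro (e | e); exacts [hp.1 e, hp.2 e])]
    rw [hstep, pvB0_skip notch cut_point t o _ md hd (fun q hq => h q (List.mem_cons_of_mem _ hq))]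
    simp

-- in state 1, points other than `other` only extend mid
lemma pvB1_skip (notch cut_point : Int × Int) :
    ∀ (l : List (Int × Int)) (o : Option (Int × Int)) (tl md hd : List (Int × Int)),
      (∀ p ∈ l, some p ≠ o) →
      l.foldl (pvStepB notch cut_point) (1, o, tl, md, hd) = (1, o, tl, md ++ l, hd)
  | [], _, _, _, _, _ => by simp
  | p :: t, o, tl, md, hd, h => by
    rw [List.foldl_cons]
    have hstep : pvStepB notch cut_point (1, o, tl, md, hd) p = (1, o, tl, md ++ [p], hd) := by
      unfold pvStepB
      rw [if_neg (by simp), if_pos rfl, if_neg (h p (List.mem_cons_self ..))]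
    rw [hstep, pvB1_skip notch cut_point t o tl _ hd (fun q hq => h q (List.mem_cons_of_mem _ hq))]
    simp

-- in state 2, everything goes to head
lemma pvB2_all (notch cut_point : Int × Int) :
    ∀ (l : List (Int × Int)) (o : Option (Int × Int)) (tl md hd : List (Int × Int)),
      l.foldl (pvStepB notch cut_point) (2, o, tl, md, hd) = (2, o, tl, md, hd ++ l)
  | [], _, _, _, _ => by simp
  | p :: t, o, tl, md, hd => by
    rw [List.foldl_cons]
    have hstep : pvStepB notch cut_point (2, o, tl, md, hd) p = (2, o, tl, md, hd ++ [p]) := by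
      unfold pvStepB
      rw [if_neg (by simp), if_neg (by simp)]
    rw [hstep, pvB2_all notch cut_point t o tl md _]
    simp

-- B's value on a polygon decomposed around the two cut vertices
lemma pvB_eval (notch cut_point : Int × Int) (hnc : notch ≠ cut_point)
    (poly H M T : List (Int × Int)) (plo phi : Int × Int)
    (hpoly : poly = H ++ plo :: (M ++ phi :: T))
    (hd : (phi = cut_point ∧ plo = notch) ∨ (phi = notch ∧ plo = cut_point))
    (hT : ∀ p ∈ T, p ≠ cut_point ∧ p ≠ notch)
    (hM : ∀ p ∈ M, p ≠ plo) :
    get_cut_polygon_alt poly notch cut_point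
      = (H ++ plo :: (phi :: T), plo :: (M ++ [phi])) := by
  have hrev : poly.reverse = T.reverse ++ phi :: (M.reverse ++ plo :: H.reverse) := by
    subst hpoly
    simp
  show (let r := poly.reverse.foldl (pvStepB notch cut_point) (0, none, [], [], [])
        ((if poly ≠ [] ∧ r.1 ≠ 2 then ([], [])
          else (r.2.2.2.2.reverse ++ r.2.2.1.reverse, r.2.2.2.1.reverse)) :
          (List (Int × Int)) × (List (Int × Int)))) = _
  rw [hrev, List.foldl_append,
    pvB0_skip notch cut_point T.reverse none [] [] [] (fun p hp => hT p (List.mem_reverse.mp hp)),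
    List.foldl_cons]
  have hstep0 : pvStepB notch cut_point (0, none, [] ++ T.reverse, [], []) phi
      = (1, some plo, ([] ++ T.reverse) ++ [phi], [] ++ [phi], []) := by
    unfold pvStepB
    have hin : phi = cut_point ∨ phi = notch := by
      rcases hd with ⟨h1, _⟩ | ⟨h1, _⟩
      · exact Or.inl h1
      · exact Or.inr h1
    rw [if_pos rfl, if_pos hin]
    rcases hd with ⟨h1, h2⟩ | ⟨h1, h2⟩
    · rw [if_pos h1, h2]
    · rw [if_neg (by rw [h1]; exact hnc), h2]
  rw [hstep0, List.foldl_append,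
    pvB1_skip notch cut_point M.reverse (some plo) _ _ []
      (fun p hp e => hM p (List.mem_reverse.mp hp) (Option.some.inj e)),
    List.foldl_cons]
  have hstep1 : pvStepB notch cut_point (1, some plo, ([] ++ T.reverse) ++ [phi], ([] ++ [phi]) ++ M.reverse, []) plo
      = (2, some plo, ([] ++ T.reverse) ++ [phi], (([] ++ [phi]) ++ M.reverse) ++ [plo], [] ++ [plo]) := by
    unfold pvStepB
    rw [if_neg (by simp), if_pos rfl, if_pos rfl]
  rw [hstep1, pvB2_all notch cut_point H.reverse (some plo) _ _ _]
  simp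

-- the common core: A and B agree once the min/max of the two last indices are known
lemma pvCore (poly : List (Int × Int)) (notch cut_point : Int × Int) (hnc : notch ≠ cut_point)
    (klo khi : Nat) (i1 i2 : Int)
    (hlt : klo < khi) (hlen : khi < poly.length)
    (plo phi : Int × Int)
    (hplo : poly[klo]'(Nat.lt_trans hlt hlen) = plo) (hphi : poly[khi]'hlen = phi)
    (hfind : pvFind poly notch cut_point = (some i1, some i2))
    (hlo : min i1 i2 = (klo : Int)) (hhi : max i1 i2 = (khi : Int))
    (hdd : (phi = cut_point ∧ plo = notch) ∨ (phi = notch ∧ plo = cut_point))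
    (hafterlo : ∀ j (hj : j < poly.length), klo < j → poly[j] ≠ plo)
    (hafterhi : ∀ j (hj : j < poly.length), khi < j → poly[j] ≠ cut_point ∧ poly[j] ≠ notch) :
    get_cut_polygon poly notch cut_point = get_cut_polygon_alt poly notch cut_point := by
  have hklo : klo < poly.length := Nat.lt_trans hlt hlen
  obtain ⟨H, hH⟩ : ∃ l, poly.take klo = l := ⟨_, rfl⟩
  obtain ⟨M, hM⟩ : ∃ l, (poly.drop (klo + 1)).take (khi - (klo + 1)) = l := ⟨_, rfl⟩
  obtain ⟨T, hT⟩ : ∃ l, poly.drop (khi + 1) = l := ⟨_, rfl⟩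
  have hHlen : H.length = klo := by rw [← hH, List.length_take]; omega
  have hMlen : M.length = khi - (klo + 1) := by
    rw [← hM, List.length_take, List.length_drop]; omega
  have h3 : poly.drop (klo + 1) = M ++ poly.drop khi := by
    conv_lhs => rw [← List.take_append_drop (khi - (klo + 1)) (poly.drop (klo + 1))]
    rw [List.drop_drop, hM]
    congr 2
    omega
  have hpoly : poly = H ++ plo :: (M ++ phi :: T) := by
    conv_lhs => rw [← List.take_append_drop klo poly]
    rw [List.drop_eq_getElem_cons hklo, hplo, h3, List.drop_eq_getElem_cons hlen, hphi, hH, hT]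
  -- A's value
  have hA : get_cut_polygon poly notch cut_point
      = (poly.take (klo + 1) ++ poly.drop khi, (poly.drop klo).take (khi + 1 - klo)) := by
    unfold get_cut_polygon
    rw [hfind]
    show pvSplit poly i1 i2 = _
    rw [pvLoop2_enum]
    exact pvLoop2_eq poly i1 i2 klo khi hlo hhi hlt hlen
  -- segment forms of the three slices
  have e1 : poly.take (klo + 1) = H ++ [plo] := by
    have hp' : poly = (H ++ [plo]) ++ (M ++ phi :: T) := by rw [hpoly]; simp
    conv_lhs => rw [hp']
    rw [List.take_left' (by rw [List.length_append, hHlen]; simp)]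
  have e2 : poly.drop khi = phi :: T := by
    have hp' : poly = (H ++ plo :: M) ++ (phi :: T) := by rw [hpoly]; simp
    conv_lhs => rw [hp']
    rw [List.drop_left' (by rw [List.length_append, hHlen, List.length_cons, hMlen]; omega)]
  have e3 : (poly.drop klo).take (khi + 1 - klo) = plo :: (M ++ [phi]) := by
    have hp' : poly = H ++ ((plo :: (M ++ [phi])) ++ T) := by rw [hpoly]; simp
    have hd' : poly.drop klo = (plo :: (M ++ [phi])) ++ T := by
      conv_lhs => rw [hp']
      rw [List.drop_left' hHlen]
    rw [hd', List.take_left' (by rw [List.length_cons, List.length_append, hMlen]; simp; omega)]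
  -- B's value
  have hB : get_cut_polygon_alt poly notch cut_point
      = (H ++ plo :: (phi :: T), plo :: (M ++ [phi])) := by
    refine pvB_eval notch cut_point hnc poly H M T plo phi hpoly hdd ?_ ?_
    · intro p hp
      rw [← hT, List.mem_iff_getElem] at hp
      obtain ⟨j, hj, rfl⟩ := hp
      rw [List.getElem_drop]
      have hjl : khi + 1 + j < poly.length := by
        rw [List.length_drop] at hj; omega
      exact hafterhi (khi + 1 + j) hjl (by omega)
    · intro p hp
      rw [← hM, List.mem_iff_getElem] at hp
      obtain ⟨j, hj, rfl⟩ := hp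
      rw [List.getElem_take, List.getElem_drop]
      have hjl : j < khi - (klo + 1) := by
        rw [List.length_take, List.length_drop] at hj; omega
      exact hafterlo (klo + 1 + j) (by omega) (by omega)
  rw [hA, hB, e1, e2, e3]
  simp

-- ===== VERDICT (by name: the statement is the Claim_ definition above) =====
theorem get_cut_polygon_spec : Claim_equal_get_cut_polygon := by
  intro poly notch cut _dom hpre
  unfold Spec_get_cut_polygon
  rcases hpre with rfl | ⟨hnc, hcut, hnotch⟩
  · rfl
  obtain ⟨k1, hk1, hv1, hl1⟩ := pvExistsLast cut poly hcut
  obtain ⟨k2, hk2, hv2, hl2⟩ := pvExistsLast notch poly hnotch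
  have hk12 : k1 ≠ k2 := by
    intro e
    subst e
    exact hnc (hv2.symm.trans hv1)
  have hfind := pvFind_eq poly notch cut hnc k1 k2 hk1 hk2 hv1 hv2 hl1 hl2
  by_cases hcmp : k1 < k2
  · exact pvCore poly notch cut hnc k1 k2 ((k1 : Int)) ((k2 : Int)) hcmp hk2 cut notch hv1 hv2
      hfind (by omega) (by omega) (Or.inr ⟨rfl, rfl⟩) hl1
      (fun j hj hgt => ⟨hl1 j hj (by omega), hl2 j hj hgt⟩)
  · have hcmp' : k2 < k1 := by omega
    exact pvCore poly notch cut hnc k2 k1 ((k1 : Int)) ((k2 : Int)) hcmp' hk1 notch cut hv2 hv1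
      hfind (by omega) (by omega) (Or.inl ⟨rfl, rfl⟩) hl2
      (fun j hj hgt => ⟨hl1 j hj hgt, hl2 j hj (by omega)⟩)
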